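-- pv_equiv track=rewrite | github.com/DOMIAXEGDE/infinity | astronaut.py | classify_base
-- ===== SOURCE A (Python) =====
-- import math
--
-- def classify_base(base: int) -> str:
--     if base < 2:
--         return "invalid"
--     if base == 2:
--         return "prime"
--     if base % 2 == 0:
--         return "other"
--     root = int(math.isqrt(base))
--     for candidate in range(3, root + 1, 2):
--         if base % candidate == 0:
--             return "other"
--     return "prime"
-- ===== SOURCE B (Python) =====
-- import math
--
-- def classify_base(base: int) -> str:
--     if base < 2:
--         return "invalid"
--     if base == 2:
--         return "prime"
--     if base % 2 == 0:
--         return "other"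
--     limit = math.isqrt(base)
--     flags = [True] * (limit + 1)
--     for p in range(2, limit + 1):
--         if flags[p]:
--             for m in range(p * p, limit + 1, p):
--                 flags[m] = False
--     primes = [p for p in range(2, limit + 1) if flags[p]]
--     for p in primes:
--         if base % p == 0:
--             return "other"
--     return "prime"
-- ===== Notes on version B (the rewrite author's own statement) =====
-- stated objective: alternative
-- what changed: B keeps the three guards but replaces A's direct trial division by odd candidates with a Sieve of Eratosthenes over 2..isqrt(base): it precomputes a boolean table, extracts the sieved prime list, and only divides base by those primes.
import Mathlib
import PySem

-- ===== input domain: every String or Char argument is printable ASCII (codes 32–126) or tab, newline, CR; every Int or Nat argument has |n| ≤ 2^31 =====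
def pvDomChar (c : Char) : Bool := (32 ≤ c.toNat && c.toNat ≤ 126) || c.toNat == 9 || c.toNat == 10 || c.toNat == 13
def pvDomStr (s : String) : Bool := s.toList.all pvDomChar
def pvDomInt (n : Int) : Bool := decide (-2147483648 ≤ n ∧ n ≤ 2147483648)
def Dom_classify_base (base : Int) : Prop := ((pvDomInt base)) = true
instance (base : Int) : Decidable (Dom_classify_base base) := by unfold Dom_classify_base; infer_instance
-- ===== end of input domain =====

-- B replaces A's trial division by odd candidates with a Sieve of Eratosthenes over 2..isqrt(base),
-- dividing base only by the sieved primes (alternative algorithm, similar cost).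


-- ===== PORT A =====
-- 'for candidate in range(3, root + 1, 2): if base % candidate == 0: return "other"' / 'return "prime"'
def loopA (base : Int) : List Int → String
  | [] => "prime"
  | c :: rest => if PySem.Int.mod base c = 0 then "other" else loopA base rest

def classify_base (base : Int) : String :=
  if base < 2 then "invalid"
  else if base = 2 then "prime"
  else if PySem.Int.mod base 2 = 0 then "other"
  else
    -- math.isqrt(base): exact, base ≥ 3 ≥ 0 here, isqrt = Nat.sqrt on nonnegative ints
    let root : Int := (Nat.sqrt base.toNat : Int)
    loopA base (PySem.List.pyRange 3 (root + 1) 2)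

-- ===== PORT B =====
-- range(p*p, limit+1, p) as a Nat list (all values nonnegative, so Nat is exact here)
def innerRange (p limit : Nat) : List Nat :=
  (List.range (if p * p ≤ limit then (limit - p * p) / p + 1 else 0)).map (fun j => p * p + j * p)

-- 'for m in range(p*p, limit+1, p): flags[m] = False'
def markMultiples (flags : List Bool) : List Nat → List Bool
  | [] => flags
  | m :: rest => markMultiples (flags.set m false) rest

-- 'for p in range(2, limit+1): if flags[p]: …'
def sieveOuter (limit : Nat) (flags : List Bool) : List Nat → List Bool
  | [] => flags
  | p :: rest =>
      sieveOuter limit (if flags.getD p false then markMultiples flags (innerRange p limit) else flags) rest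

-- 'for p in primes: if base % p == 0: return "other"' / 'return "prime"'
def loopB (base : Int) : List Nat → String
  | [] => "prime"
  | p :: rest => if PySem.Int.mod base (p : Int) = 0 then "other" else loopB base rest

def classify_base_alt (base : Int) : String :=
  if base < 2 then "invalid"
  else if base = 2 then "prime"
  else if PySem.Int.mod base 2 = 0 then "other"
  else
    -- math.isqrt(base): exact, base ≥ 3 ≥ 0 here; range(2, limit+1) as the Nat list List.range' 2 (limit-1)
    let limit : Nat := Nat.sqrt base.toNat
    let flags : List Bool := sieveOuter limit (List.replicate (limit + 1) true) (List.range' 2 (limit - 1))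
    let primes : List Nat := (List.range' 2 (limit - 1)).filter (fun p => flags.getD p false)
    loopB base primes

-- ===== PRECONDITION & SPEC =====
def Spec_classify_base (base : Int) (out : String) : Prop := out = classify_base_alt base
instance (base : Int) (out : String) : Decidable (Spec_classify_base base out) := by unfold Spec_classify_base; infer_instance

-- ===== CLAIM (what is proved, stated in full; the proofs are below) =====
def Claim_equal_classify_base : Prop := ∀ (base : Int), Dom_classify_base base → Spec_classify_base base (classify_base base)

-- ===== LEMMAS AND PROOFS =====

theorem loopA_eq (base : Int) (cs : List Int) :
    loopA base cs = if ∃ c ∈ cs, PySem.Int.mod base c = 0 then "other" else "prime" := by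
  induction cs with
  | nil => simp [loopA]
  | cons c rest ih =>
      by_cases h : PySem.Int.mod base c = 0
      · simp [loopA, h]
      · simp only [loopA, h, if_false, ih]
        congr 1
        simp [h]

theorem loopB_eq (base : Int) (ps : List Nat) :
    loopB base ps = if ∃ p ∈ ps, PySem.Int.mod base (p : Int) = 0 then "other" else "prime" := by
  induction ps with
  | nil => simp [loopB]
  | cons p rest ih =>
      by_cases h : PySem.Int.mod base (p : Int) = 0
      · simp [loopB, h]
      · simp only [loopB, h, if_false, ih]
        congr 1
        simp [h]

theorem markMultiples_length (ms : List Nat) (flags : List Bool) :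
    (markMultiples flags ms).length = flags.length := by
  induction ms generalizing flags with
  | nil => rfl
  | cons m rest ih => simp [markMultiples, ih]

theorem sieveOuter_length (limit : Nat) (ps : List Nat) (flags : List Bool) :
    (sieveOuter limit flags ps).length = flags.length := by
  induction ps generalizing flags with
  | nil => rfl
  | cons p rest ih =>
      simp only [sieveOuter]
      split_ifs with h
      · rw [ih, markMultiples_length]
      · rw [ih]

def SieveInv (flags : List Bool) : Prop :=
  ∀ i, i < flags.length → flags.getD i false = false → ¬ Nat.Prime i

theorem mem_innerRange {p limit m : Nat} (hm : m ∈ innerRange p limit) :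
    ∃ j, m = p * p + j * p := by
  simp only [innerRange, List.mem_map, List.mem_range] at hm
  obtain ⟨j, _, rfl⟩ := hm
  exact ⟨j, rfl⟩

theorem markMultiples_inv {p : Nat} (hp : 2 ≤ p) (ms : List Nat)
    (hms : ∀ m ∈ ms, ∃ j, m = p * p + j * p)
    (flags : List Bool) (hinv : SieveInv flags) :
    SieveInv (markMultiples flags ms) := by
  induction ms generalizing flags with
  | nil => exact hinv
  | cons m rest ih =>
      refine ih (fun x hx => hms x (List.mem_cons_of_mem _ hx)) _ ?_
      intro i hi hfalse
      rw [List.length_set] at hi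
      by_cases him : i = m
      · subst him
        obtain ⟨j, rfl⟩ := hms _ List.mem_cons_self
        intro hpr
        rcases (Nat.Prime.eq_one_or_self_of_dvd hpr p ⟨p + j, by ring⟩) with h1 | h2
        · omega
        · nlinarith
      · apply hinv i hi
        rw [List.getD_eq_getElem?_getD, List.getElem?_set_ne (Ne.symm him), ← List.getD_eq_getElem?_getD] at hfalse
        exact hfalse

theorem sieveOuter_inv (limit : Nat) (ps : List Nat) (hps : ∀ p ∈ ps, 2 ≤ p)
    (flags : List Bool) (hinv : SieveInv flags) :
    SieveInv (sieveOuter limit flags ps) := by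
  induction ps generalizing flags with
  | nil => exact hinv
  | cons p rest ih =>
      simp only [sieveOuter]
      refine ih (fun x hx => hps x (List.mem_cons_of_mem _ hx)) _ ?_
      split_ifs with h
      · exact markMultiples_inv (hps p List.mem_cons_self) _ (fun m hm => mem_innerRange hm) _ hinv
      · exact hinv

theorem sieve_flag_of_prime {limit q : Nat} (hq : Nat.Prime q) (hle : q ≤ limit) :
    (sieveOuter limit (List.replicate (limit + 1) true) (List.range' 2 (limit - 1))).getD q false = true := by
  have hinv : SieveInv (sieveOuter limit (List.replicate (limit + 1) true) (List.range' 2 (limit - 1))) := by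
    refine sieveOuter_inv _ _ (fun p hp => ?_) _ (fun i hi hfalse => ?_)
    · rw [List.mem_range'_1] at hp; omega
    · rw [List.length_replicate] at hi
      rw [List.getD_eq_getElem _ _ (by simpa using hi)] at hfalse
      simp at hfalse
  have hlen : (sieveOuter limit (List.replicate (limit + 1) true) (List.range' 2 (limit - 1))).length = limit + 1 := by
    rw [sieveOuter_length, List.length_replicate]
  rcases h : (sieveOuter limit (List.replicate (limit + 1) true) (List.range' 2 (limit - 1))).getD q false with _ | _
  · exact absurd hq (hinv q (by omega) h)
  · rfl

-- main equivalence in the interesting branch (base ≥ 3, base odd)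
theorem loops_agree (base : Int) (h2 : ¬ base < 2) (hne : ¬ base = 2) (hodd : ¬ PySem.Int.mod base 2 = 0) :
    loopA base (PySem.List.pyRange 3 ((Nat.sqrt base.toNat : Int) + 1) 2) =
    loopB base ((List.range' 2 (Nat.sqrt base.toNat - 1)).filter
      (fun p => (sieveOuter (Nat.sqrt base.toNat) (List.replicate (Nat.sqrt base.toNat + 1) true)
        (List.range' 2 (Nat.sqrt base.toNat - 1))).getD p false)) := by
  set n := base.toNat with hn
  have hbase3 : 3 ≤ base := by
    by_contra h; push Not at h
    interval_cases base
    all_goals simp_all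
  have hbn : base = (n : Int) := by omega
  have hn3 : 3 ≤ n := by omega
  have hnodd : n % 2 = 1 := by
    rw [PySem.Int.mod_eq_emod_of_pos (by norm_num)] at hodd
    omega
  set L := Nat.sqrt n with hL
  have hL1 : 1 ≤ L := Nat.le_sqrt.mpr (by omega)
  rw [loopA_eq, loopB_eq]
  congr 1
  simp only [eq_iff_iff]
  constructor
  · rintro ⟨c, hc, hcmod⟩
    rw [PySem.List.mem_pyRange_iff_of_pos (by norm_num)] at hc
    obtain ⟨hc3, hclt, hcdvd⟩ := hc
    rw [PySem.Int.mod_eq_zero_iff_dvd] at hcmod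
    -- pass to Nat
    set m := c.toNat with hm
    have hcm : c = (m : Int) := by omega
    have hm3 : 3 ≤ m := by omega
    have hmL : m ≤ L := by omega
    have hmdvd : m ∣ n := by
      rw [hcm] at hcmod; rw [hbn] at hcmod; exact_mod_cast hcmod
    -- the least prime factor of m is a sieved prime dividing base
    set q := m.minFac with hq
    have hqpr : q.Prime := Nat.minFac_prime (by omega)
    have hqm : q ∣ m := Nat.minFac_dvd m
    have hqL : q ≤ L := le_trans (Nat.minFac_le (by omega)) hmL
    refine ⟨q, ?_, ?_⟩
    · rw [List.mem_filter]
      refine ⟨by rw [List.mem_range'_1]; exact ⟨hqpr.two_le, by omega⟩, ?_⟩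
      simpa using sieve_flag_of_prime hqpr hqL
    · rw [PySem.Int.mod_eq_zero_iff_dvd, hbn]
      exact_mod_cast hqm.trans hmdvd
  · rintro ⟨p, hp, hpmod⟩
    rw [List.mem_filter, List.mem_range'_1] at hp
    obtain ⟨⟨hp2, hplt⟩, _⟩ := hp
    have hpL : p ≤ L := by omega
    rw [PySem.Int.mod_eq_zero_iff_dvd, hbn] at hpmod
    have hpdvd : p ∣ n := by exact_mod_cast hpmod
    have hpodd : p % 2 = 1 := by
      rcases Nat.even_or_odd p with he | ho
      · exfalso
        have h2n : (2:Nat) ∣ n := he.two_dvd.trans hpdvd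
        omega
      · exact Nat.odd_iff.mp ho
    refine ⟨(p : Int), ?_, ?_⟩
    · rw [PySem.List.mem_pyRange_iff_of_pos (by norm_num)]
      refine ⟨by omega, by omega, ?_⟩
      have : ((p : Int) - 3) % 2 = 0 := by omega
      omega
    · rw [PySem.Int.mod_eq_zero_iff_dvd, hbn]
      exact_mod_cast hpdvd

-- ===== VERDICT (by name: the statement is the Claim_ definition above) =====
theorem classify_base_spec : Claim_equal_classify_base := by
  intro base _
  unfold Spec_classify_base classify_base classify_base_alt
  split_ifs with h1 h2 h3
  · rfl
  · rfl
  · rfl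
  · exact loops_agree base h1 h2 h3
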